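-- pv_equiv track=rewrite | github.com/muronghezi/representations-of-a-phylogenetic-tree | representations.py | is_partition
-- ===== SOURCE A (Python) =====
-- def is_partition(partition,n):# "partition" is a list of tuples of numbers. Output is 'yes' if the sets of those tuples form a partition of the set {1,2,...,n}, n is a natural number bigger than 2.
--     N = range(1,n+1)
--     S = []
--     for part in partition:
--         S.append(set(part))
--     if (set.union(*S) != set(N) ):
--         return 'no'
--     while (S != []):
--         p1 = S[0]
--         i = 1
--         while (i < len(S)):
--             p2 = S[i]
--             i = i+1
--             if (p1.intersection(p2) != set()):
--                 return 'no'
--         S.remove(p1)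
--     return 'yes'
-- ===== SOURCE B (Python) =====
-- def is_partition(partition, n):
--     # One pass: grow a 'seen' set, reject on any overlap, then compare with {1..n}.
--     seen = set()
--     for part in partition:
--         s = set(part)
--         if seen & s:
--             return 'no'
--         seen |= s
--     return 'yes' if seen == set(range(1, n + 1)) else 'no'
-- ===== Notes on version B (the rewrite author's own statement) =====
-- stated objective: faster
-- what changed: A builds all part-sets, checks the union, then does a quadratic pairwise-intersection sweep with repeated list.remove; B makes one pass growing a 'seen' set, rejecting on the first overlap, and finally compares 'seen' with set(range(1, n+1)).
import Mathlib
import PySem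

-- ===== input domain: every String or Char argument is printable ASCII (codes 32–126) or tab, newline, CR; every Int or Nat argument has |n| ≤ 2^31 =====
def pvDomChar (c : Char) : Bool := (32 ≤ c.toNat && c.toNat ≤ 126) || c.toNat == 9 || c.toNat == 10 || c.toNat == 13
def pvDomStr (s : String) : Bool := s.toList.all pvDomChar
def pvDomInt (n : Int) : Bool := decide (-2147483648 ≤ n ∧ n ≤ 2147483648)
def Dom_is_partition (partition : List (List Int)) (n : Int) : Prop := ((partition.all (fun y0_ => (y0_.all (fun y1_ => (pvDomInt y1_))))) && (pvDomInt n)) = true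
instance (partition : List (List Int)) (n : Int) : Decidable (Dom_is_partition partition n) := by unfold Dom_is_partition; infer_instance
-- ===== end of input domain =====

-- B replaces A's quadratic pairwise-intersection sweep by one pass growing a 'seen' set
-- (reject on overlap, then compare with {1..n}); equivalence is about the return value only.

-- ===== PORT A =====
-- set.union(*S): union of a NONEMPTY list of sets, folded from the first element.
-- (On S = [] Python raises TypeError — excluded by Pre_; the [] branch value is never claimed.)
def unionStar (S : List (PySem.Set Int)) : PySem.Set Int :=
  match S with
  | [] => []
  | s :: rest => rest.foldl PySem.Set.union s

-- inner 'while i < len(S)': scan S[1:] for a set intersecting p1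
def innerScan (p1 : PySem.Set Int) (rest : List (PySem.Set Int)) : Bool :=
  rest.any (fun p2 => !(PySem.Set.equal (PySem.Set.inter p1 p2) PySem.Set.empty))

-- outer 'while S != []': p1 = S[0]; S.remove(p1) removes the FIRST element equal to p1,
-- which is S[0] itself — so each iteration drops the head; ported as structural recursion.
def outerLoop (S : List (PySem.Set Int)) : String :=
  match S with
  | [] => "yes"
  | p1 :: rest => if innerScan p1 rest then "no" else outerLoop rest

def is_partition (partition : List (List Int)) (n : Int) : String :=
  let N := PySem.List.pyRange 1 (n + 1) 1
  let S := partition.map (fun part => PySem.Set.ofList part)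
  if !(PySem.Set.equal (unionStar S) (PySem.Set.ofList N)) then "no"
  else outerLoop S

-- ===== PORT B =====
def altLoop (parts : List (List Int)) (seen : PySem.Set Int) (n : Int) : String :=
  match parts with
  | [] =>
      if PySem.Set.equal seen (PySem.Set.ofList (PySem.List.pyRange 1 (n + 1) 1))
      then "yes" else "no"
  | part :: rest =>
      let s := PySem.Set.ofList part
      if !(PySem.Set.inter seen s).isEmpty then "no"
      else altLoop rest (PySem.Set.union seen s) n

def is_partition_alt (partition : List (List Int)) (n : Int) : String :=
  altLoop partition PySem.Set.empty n

-- ===== PRECONDITION & SPEC =====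
-- Pre_ excludes only the empty partition list, on which A's 'set.union(*S)' raises TypeError.
def Pre_is_partition (partition : List (List Int)) (n : Int) : Prop := partition ≠ []
instance (partition : List (List Int)) (n : Int) : Decidable (Pre_is_partition partition n) := by unfold Pre_is_partition; infer_instance
def pvWitness_is_partition : List (List Int) × Int := ([[1, 2], [3]], 3)

def Spec_is_partition (partition : List (List Int)) (n : Int) (out : String) : Prop := out = is_partition_alt partition n
instance (partition : List (List Int)) (n : Int) (out : String) : Decidable (Spec_is_partition partition n out) := by unfold Spec_is_partition; infer_instance

-- ===== CLAIM (what is proved, stated in full; the proofs are below) =====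
def Claim_equal_is_partition : Prop := ∀ (partition : List (List Int)) (n : Int), Dom_is_partition partition n → Pre_is_partition partition n → Spec_is_partition partition n (is_partition partition n)

-- ===== LEMMAS AND PROOFS =====

lemma no_ne_yes : ("no" : String) ≠ "yes" := by decide

-- equation lemma for A (unfolds the two lets)
lemma A_eq (parts : List (List Int)) (n : Int) :
    is_partition parts n =
      if !(PySem.Set.equal (unionStar (parts.map (fun part => PySem.Set.ofList part)))
            (PySem.Set.ofList (PySem.List.pyRange 1 (n + 1) 1))) then "no"
      else outerLoop (parts.map (fun part => PySem.Set.ofList part)) := rfl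

-- "x lies in some part" — the shared semantic content of both union computations
def InParts (parts : List (List Int)) (x : Int) : Prop := ∃ p ∈ parts, x ∈ p

-- pairwise disjointness of the parts
def Disj (p q : List Int) : Prop := ∀ x, x ∈ p → x ∉ q

lemma mem_foldl_union (L : List (PySem.Set Int)) (s : PySem.Set Int) (x : Int) :
    x ∈ L.foldl PySem.Set.union s ↔ x ∈ s ∨ ∃ t ∈ L, x ∈ t := by
  induction L generalizing s with
  | nil => simp
  | cons h t ih =>
      simp only [List.foldl_cons, ih, PySem.Set.mem_union]
      constructor
      · rintro (⟨hx | hx⟩ | ⟨u, hu, hx⟩)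
        · exact Or.inl hx
        · exact Or.inr ⟨h, by simp, hx⟩
        · exact Or.inr ⟨u, by simp [hu], hx⟩
      · rintro (hx | ⟨u, hu, hx⟩)
        · exact Or.inl (Or.inl hx)
        · rcases List.mem_cons.mp hu with rfl | hu
          · exact Or.inl (Or.inr hx)
          · exact Or.inr ⟨u, hu, hx⟩

lemma mem_unionStar (parts : List (List Int)) (x : Int) (h : parts ≠ []) :
    x ∈ unionStar (parts.map (fun part => PySem.Set.ofList part)) ↔ InParts parts x := by
  cases parts with
  | nil => exact absurd rfl h
  | cons p rest =>
      simp only [List.map_cons, unionStar, mem_foldl_union, InParts]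
      constructor
      · rintro (hx | ⟨t, ht, hx⟩)
        · exact ⟨p, by simp, (PySem.Set.mem_ofList _ _).mp hx⟩
        · rcases List.mem_map.mp ht with ⟨q, hq, rfl⟩
          exact ⟨q, by simp [hq], (PySem.Set.mem_ofList _ _).mp hx⟩
      · rintro ⟨q, hq, hx⟩
        rcases List.mem_cons.mp hq with rfl | hq
        · exact Or.inl ((PySem.Set.mem_ofList _ _).mpr hx)
        · exact Or.inr ⟨PySem.Set.ofList q, List.mem_map.mpr ⟨q, hq, rfl⟩,
            (PySem.Set.mem_ofList _ _).mpr hx⟩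

-- the inner scan reports no overlap iff p1 is disjoint from every later set
lemma innerScan_eq_false_iff (p1 : PySem.Set Int) (rest : List (PySem.Set Int)) :
    innerScan p1 rest = false ↔ ∀ q ∈ rest, ∀ x, x ∈ p1 → x ∉ q := by
  simp only [innerScan, List.any_eq_false, Bool.not_eq_eq_eq_not, Bool.not_true,
    Bool.not_eq_false]
  constructor
  · intro h q hq x hx1 hx2
    have hm := ((PySem.Set.equal_iff _ _).mp (h q hq) x).mp
      ((PySem.Set.mem_inter _ _ _).mpr ⟨hx1, hx2⟩)
    simp [PySem.Set.empty] at hm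
  · intro h q hq
    rw [PySem.Set.equal_iff]
    intro x
    simp only [PySem.Set.mem_inter, PySem.Set.empty, List.not_mem_nil, iff_false, not_and]
    exact fun h1 => h q hq x h1

lemma outerLoop_eq (S : List (PySem.Set Int)) :
    outerLoop S = if S.Pairwise (fun p q => ∀ x, x ∈ p → x ∉ q) then "yes" else "no" := by
  induction S with
  | nil => simp [outerLoop]
  | cons p rest ih =>
      by_cases hs : innerScan p rest = true
      · have h1 : ¬ (p :: rest).Pairwise (fun p q => ∀ x, x ∈ p → x ∉ q) := by
          intro hc
          have := (innerScan_eq_false_iff p rest).mpr (List.pairwise_cons.mp hc).1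
          rw [this] at hs; exact Bool.false_ne_true hs
        simp only [outerLoop, hs, if_true, if_neg h1]
      · have hf : innerScan p rest = false := Bool.eq_false_iff.mpr hs
        have hd := (innerScan_eq_false_iff p rest).mp hf
        simp only [outerLoop, hf, Bool.false_eq_true, if_false, ih]
        by_cases hp : rest.Pairwise (fun p q => ∀ x, x ∈ p → x ∉ q)
        · rw [if_pos hp, if_pos (List.pairwise_cons.mpr ⟨hd, hp⟩)]
        · rw [if_neg hp, if_neg (fun hc => hp (List.pairwise_cons.mp hc).2)]

lemma pairwise_map_disj (parts : List (List Int)) :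
    (parts.map (fun part => PySem.Set.ofList part)).Pairwise
        (fun p q => ∀ x, x ∈ p → x ∉ q)
      ↔ parts.Pairwise Disj := by
  rw [List.pairwise_map]
  constructor <;> intro h <;> refine h.imp ?_ <;> intro a b hab x hx
  · exact fun hq => (hab x ((PySem.Set.mem_ofList _ _).mpr hx)) ((PySem.Set.mem_ofList _ _).mpr hq)
  · intro hq
    exact (hab x ((PySem.Set.mem_ofList _ _).mp hx)) ((PySem.Set.mem_ofList _ _).mp hq)

-- characterisation of A on nonempty input
lemma A_char (parts : List (List Int)) (n : Int) (h : parts ≠ []) :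
    is_partition parts n = "yes" ↔
      ((∀ x, InParts parts x ↔ x ∈ PySem.List.pyRange 1 (n + 1) 1) ∧ parts.Pairwise Disj) := by
  rw [A_eq, outerLoop_eq]
  by_cases hu : PySem.Set.equal (unionStar (parts.map (fun part => PySem.Set.ofList part)))
      (PySem.Set.ofList (PySem.List.pyRange 1 (n + 1) 1)) = true
  · rw [hu]
    simp only [Bool.not_true, Bool.false_eq_true, if_false]
    have hmem : ∀ x, InParts parts x ↔ x ∈ PySem.List.pyRange 1 (n + 1) 1 := fun x =>
      ((mem_unionStar parts x h).symm.trans ((PySem.Set.equal_iff _ _).mp hu x)).trans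
        (PySem.Set.mem_ofList _ _)
    by_cases hp : (parts.map (fun part => PySem.Set.ofList part)).Pairwise
        (fun p q => ∀ x, x ∈ p → x ∉ q)
    · rw [if_pos hp]
      exact ⟨fun _ => ⟨hmem, (pairwise_map_disj parts).mp hp⟩, fun _ => rfl⟩
    · rw [if_neg hp]
      exact ⟨fun hc => absurd hc no_ne_yes,
        fun hc => absurd ((pairwise_map_disj parts).mpr hc.2) hp⟩
  · have hu' := Bool.eq_false_iff.mpr hu
    rw [hu']
    simp only [Bool.not_false, if_true]
    refine ⟨fun hc => absurd hc no_ne_yes, fun hc => absurd ?_ hu⟩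
    rw [PySem.Set.equal_iff]
    exact fun x => (mem_unionStar parts x h).trans
      ((hc.1 x).trans (PySem.Set.mem_ofList _ _).symm)

lemma A_cases (parts : List (List Int)) (n : Int) :
    is_partition parts n = "yes" ∨ is_partition parts n = "no" := by
  rw [A_eq]
  split
  · exact Or.inr rfl
  · rw [outerLoop_eq]; split
    · exact Or.inl rfl
    · exact Or.inr rfl

-- characterisation of B's loop: "yes" iff new parts avoid seen, are pairwise
-- disjoint, and together with seen cover exactly {1..n}
lemma altLoop_char (parts : List (List Int)) (seen : PySem.Set Int) (n : Int) :
    altLoop parts seen n = "yes" ↔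
      ((∀ p ∈ parts, ∀ x, x ∈ seen → x ∉ p) ∧ parts.Pairwise Disj ∧
        (∀ x, (x ∈ seen ∨ InParts parts x) ↔ x ∈ PySem.List.pyRange 1 (n + 1) 1)) := by
  induction parts generalizing seen with
  | nil =>
      simp only [altLoop]
      by_cases he : PySem.Set.equal seen (PySem.Set.ofList (PySem.List.pyRange 1 (n + 1) 1)) = true
      · rw [if_pos he]
        refine ⟨fun _ => ⟨by simp, List.Pairwise.nil, fun x => ?_⟩, fun _ => rfl⟩
        have hx := ((PySem.Set.equal_iff _ _).mp he x).trans (PySem.Set.mem_ofList _ _)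
        simp [InParts, hx]
      · rw [Bool.eq_false_iff.mpr he]
        simp only [Bool.false_eq_true, if_false]
        refine ⟨fun hc => absurd hc no_ne_yes, fun hc => absurd ?_ he⟩
        rw [PySem.Set.equal_iff]
        intro x
        have hx := hc.2.2 x
        simp only [InParts, List.not_mem_nil, false_and, exists_const, or_false] at hx
        exact hx.trans (PySem.Set.mem_ofList _ _).symm
  | cons part rest ih =>
      simp only [altLoop]
      by_cases hd : (∀ x, x ∈ seen → x ∉ part)
      · have hempty : (PySem.Set.inter seen (PySem.Set.ofList part)).isEmpty = true := by
          rw [List.isEmpty_iff, List.eq_nil_iff_forall_not_mem]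
          intro x hx
          rcases (PySem.Set.mem_inter _ _ _).mp hx with ⟨h1, h2⟩
          exact hd x h1 ((PySem.Set.mem_ofList _ _).mp h2)
        rw [hempty]
        simp only [Bool.not_true, Bool.false_eq_true, if_false,
          ih (PySem.Set.union seen (PySem.Set.ofList part))]
        constructor
        · rintro ⟨hdis, hp, hmem⟩
          refine ⟨?_, ?_, ?_⟩
          · intro p hp' x hx
            rcases List.mem_cons.mp hp' with rfl | hp'
            · exact hd x hx
            · exact hdis p hp' x ((PySem.Set.mem_union _ _ _).mpr (Or.inl hx))
          · rw [List.pairwise_cons]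
            refine ⟨?_, hp⟩
            intro q hq x hxp
            exact hdis q hq x ((PySem.Set.mem_union _ _ _).mpr
              (Or.inr ((PySem.Set.mem_ofList _ _).mpr hxp)))
          · intro x
            rw [← hmem x]
            simp only [PySem.Set.mem_union, PySem.Set.mem_ofList, InParts, List.mem_cons]
            constructor
            · rintro (hx | ⟨p, (rfl | hp'), hx⟩)
              · exact Or.inl (Or.inl hx)
              · exact Or.inl (Or.inr hx)
              · exact Or.inr ⟨p, hp', hx⟩
            · rintro ((hx | hx) | ⟨p, hp', hx⟩)
              · exact Or.inl hx
              · exact Or.inr ⟨part, Or.inl rfl, hx⟩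
              · exact Or.inr ⟨p, Or.inr hp', hx⟩
        · rintro ⟨hdis, hp, hmem⟩
          rw [List.pairwise_cons] at hp
          refine ⟨?_, hp.2, ?_⟩
          · intro p hp' x hx
            rcases (PySem.Set.mem_union _ _ _).mp hx with h1 | h1
            · exact hdis p (List.mem_cons.mpr (Or.inr hp')) x h1
            · exact hp.1 p hp' x ((PySem.Set.mem_ofList _ _).mp h1)
          · intro x
            rw [← hmem x]
            simp only [PySem.Set.mem_union, PySem.Set.mem_ofList, InParts, List.mem_cons]
            constructor
            · rintro ((hx | hx) | ⟨p, hp', hx⟩)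
              · exact Or.inl hx
              · exact Or.inr ⟨part, Or.inl rfl, hx⟩
              · exact Or.inr ⟨p, Or.inr hp', hx⟩
            · rintro (hx | ⟨p, (rfl | hp'), hx⟩)
              · exact Or.inl (Or.inl hx)
              · exact Or.inl (Or.inr hx)
              · exact Or.inr ⟨p, hp', hx⟩
      · have hne : (PySem.Set.inter seen (PySem.Set.ofList part)).isEmpty = false := by
          push_neg at hd
          rcases hd with ⟨x, hx1, hx2⟩
          rw [Bool.eq_false_iff]
          intro hc
          rw [List.isEmpty_iff, List.eq_nil_iff_forall_not_mem] at hc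
          exact hc x ((PySem.Set.mem_inter _ _ _).mpr ⟨hx1, (PySem.Set.mem_ofList _ _).mpr hx2⟩)
        rw [hne]
        simp only [Bool.not_false, if_true]
        refine ⟨fun hc => absurd hc no_ne_yes, ?_⟩
        rintro ⟨hdis, _, _⟩
        exact absurd (fun x hx => hdis part (List.mem_cons.mpr (Or.inl rfl)) x hx) hd

lemma B_cases (parts : List (List Int)) (n : Int) :
    is_partition_alt parts n = "yes" ∨ is_partition_alt parts n = "no" := by
  unfold is_partition_alt
  generalize PySem.Set.empty = seen
  induction parts generalizing seen with
  | nil => simp only [altLoop]; split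
           · exact Or.inl rfl
           · exact Or.inr rfl
  | cons p rest ih =>
      simp only [altLoop]; split
      · exact Or.inr rfl
      · exact ih _

lemma B_char (parts : List (List Int)) (n : Int) :
    is_partition_alt parts n = "yes" ↔
      ((∀ x, InParts parts x ↔ x ∈ PySem.List.pyRange 1 (n + 1) 1) ∧ parts.Pairwise Disj) := by
  unfold is_partition_alt
  rw [altLoop_char]
  simp only [PySem.Set.empty, List.not_mem_nil, false_implies, implies_true, true_and,
    false_or]
  tauto

-- ===== VERDICT (by name: the statement is the Claim_ definition above) =====
theorem is_partition_spec : Claim_equal_is_partition := by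
  intro parts n _ hpre
  unfold Spec_is_partition
  have hA := A_char parts n hpre
  have hB := B_char parts n
  rcases A_cases parts n with ha | ha <;> rcases B_cases parts n with hb | hb
  · rw [ha, hb]
  · exfalso
    have := hB.mpr (hA.mp ha)
    rw [hb] at this
    exact no_ne_yes this
  · exfalso
    have := hA.mpr (hB.mp hb)
    rw [ha] at this
    exact no_ne_yes this
  · rw [ha, hb]
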